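-- pv_equiv track=rewrite | github.com/daniel-reich/turbo-robot | Kv8DMmwfuKTLyZD5E_24.py | make_dartboard
-- ===== SOURCE A (Python) =====
-- def make_dartboard(n):
--     if n == 0:
--         return []
--     result = ["1"] * n
--     if n % 2 == 0:
--         result[0] = int("1" * n)
--         for i in range(1, n // 2):
--             result[i] = result[i - 1] + int("1" * (n - 2 * i) + "0" * i)
--         for i in range(n // 2, n):
--             result[i] = result[n - 1 - i]
--     elif n % 2 != 0:
--         result[0] = int("1" * n)
--         for i in range(1, n // 2 + 1):
--             result[i] = result[i - 1] + int("1" * (n - 2 * i) + "0" * i)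
--         for i in range(n // 2 + 1, n):
--             result[i] = result[n - 1 - i]
--     return result
-- ===== SOURCE B (Python) =====
-- def make_dartboard(n):
--     # Closed form: row i is the product of two repunits,
--     # (10**(d+1) - 1) // 9 * ((10**(n-d) - 1) // 9) with d = min(i, n-1-i),
--     # i.e. (10**(d+1) - 1) * (10**(n-d) - 1) // 81.  No cumulative sums, no mirror pass.
--     if n == 0:
--         return []
--     result = []
--     for i in range(n):
--         d = min(i, n - 1 - i)
--         result.append((10 ** (d + 1) - 1) * (10 ** (n - d) - 1) // 81)
--     return result
-- ===== Notes on version B (the rewrite author's own statement) =====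
-- stated objective: alternative
-- what changed: Replaces A's string-built repunit parsing, cumulative prefix-sum loop and separate parity-split mirror-copy loops by one uniform pass that computes each row directly from the closed form (10**(d+1)-1)*(10**(n-d)-1)//81 with d=min(i,n-1-i).
import Mathlib
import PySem

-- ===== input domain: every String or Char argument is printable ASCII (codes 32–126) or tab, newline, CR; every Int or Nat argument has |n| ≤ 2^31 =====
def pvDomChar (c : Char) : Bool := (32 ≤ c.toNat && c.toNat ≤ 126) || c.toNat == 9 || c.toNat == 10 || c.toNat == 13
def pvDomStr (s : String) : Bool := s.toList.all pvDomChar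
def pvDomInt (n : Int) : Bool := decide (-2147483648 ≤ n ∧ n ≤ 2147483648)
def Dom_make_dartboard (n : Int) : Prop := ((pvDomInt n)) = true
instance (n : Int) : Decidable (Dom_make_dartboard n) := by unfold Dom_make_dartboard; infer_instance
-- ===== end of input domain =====

-- B replaces A's string-built repunits, cumulative sums and parity-split mirror loops by the
-- closed form (10^(d+1)-1)*(10^(n-d)-1)//81 per row, d = min(i, n-1-i) (alternative algorithm).

-- ===== PORT A =====
-- hand port of int("1" * k): the repunit with k ones, parsed digit-by-digit (acc*10+1);
-- exact for k ≥ 1 (string repetition + int() on the result is not a PySem primitive)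
def repOnesNat : Nat → Int
  | 0 => 0
  | k + 1 => 10 * repOnesNat k + 1

def repOnes (a : Int) : Int := repOnesNat a.toNat

-- hand port of int("1" * a + "0" * b) = repunit(a) · 10^b; exact for a ≥ 1, b ≥ 0
-- (which holds at every call site inside the loops, given n ≥ 1 from Pre_)
def onesZeros (a b : Int) : Int := repOnes a * 10 ^ b.toNat

def make_dartboard (n : Int) : List Int :=
  if n = 0 then [] else
  -- result = ["1"] * n; placeholder 1 : Int — for n ≥ 1 every cell is overwritten before
  -- it is read or returned, so the initial string "1" never escapes
  let result : List Int := List.replicate n.toNat 1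
  if PySem.Int.mod n 2 = 0 then
    let result := PySem.List.pySetD result 0 (repOnes n)
    let result := (PySem.List.pyRange 1 (PySem.Int.floordiv n 2) 1).foldl
      (fun r i => PySem.List.pySetD r i
        (PySem.List.pyGetD r (i - 1) 0 + onesZeros (n - 2 * i) i)) result
    let result := (PySem.List.pyRange (PySem.Int.floordiv n 2) n 1).foldl
      (fun r i => PySem.List.pySetD r i (PySem.List.pyGetD r (n - 1 - i) 0)) result
    result
  else
    let result := PySem.List.pySetD result 0 (repOnes n)
    let result := (PySem.List.pyRange 1 (PySem.Int.floordiv n 2 + 1) 1).foldl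
      (fun r i => PySem.List.pySetD r i
        (PySem.List.pyGetD r (i - 1) 0 + onesZeros (n - 2 * i) i)) result
    let result := (PySem.List.pyRange (PySem.Int.floordiv n 2 + 1) n 1).foldl
      (fun r i => PySem.List.pySetD r i (PySem.List.pyGetD r (n - 1 - i) 0)) result
    result

-- ===== PORT B =====
-- 10**e is ported as 10 ^ e.toNat: both exponents are ≥ 0 for every i in range(n)
def make_dartboard_alt (n : Int) : List Int :=
  if n = 0 then [] else
  (PySem.List.pyRange 0 n 1).foldl (fun acc i =>
    let d := min i (n - 1 - i)
    acc ++ [PySem.Int.floordiv ((10 ^ (d + 1).toNat - 1) * (10 ^ (n - d).toNat - 1)) 81]) []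

-- ===== PRECONDITION & SPEC =====
-- Pre_ excludes exactly n < 0, where A raises ValueError ("1"*n is "" and int("") fails)
def Pre_make_dartboard (n : Int) : Prop := 0 ≤ n
instance (n : Int) : Decidable (Pre_make_dartboard n) := by unfold Pre_make_dartboard; infer_instance
def pvWitness_make_dartboard : Int := 5

def Spec_make_dartboard (n : Int) (out : List Int) : Prop := out = make_dartboard_alt n
instance (n : Int) (out : List Int) : Decidable (Spec_make_dartboard n out) := by unfold Spec_make_dartboard; infer_instance

-- ===== CLAIM (what is proved, stated in full; the proofs are below) =====
def Claim_equal_make_dartboard : Prop := ∀ (n : Int), Dom_make_dartboard n → Pre_make_dartboard n → Spec_make_dartboard n (make_dartboard n)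
-- ===== LEMMAS AND PROOFS =====

-- reference prefix sums: S N d = Σ_{j=0}^{d} repunit(N-2j)·10^j (the value A stores at depth d)
def S (N : Nat) : Nat → Int
  | 0 => repOnesNat N
  | d + 1 => S N d + repOnesNat (N - 2 * (d + 1)) * 10 ^ (d + 1)

theorem nine_rep (k : Nat) : 9 * repOnesNat k = 10 ^ k - 1 := by
  induction k with
  | zero => simp [repOnesNat]
  | succ k ih =>
    rw [repOnesNat, pow_succ]
    nlinarith [ih]

-- key identity: the closed form is 81 times A's prefix sum S N d
theorem closed_form (N : Nat) : ∀ d : Nat, 2 * d + 1 ≤ N →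
    ((10 : Int) ^ (d + 1) - 1) * (10 ^ (N - d) - 1) = 81 * S N d := by
  intro d
  induction d with
  | zero =>
    intro _
    rw [show S N 0 = repOnesNat N from rfl]
    have h := nine_rep N
    rw [Nat.sub_zero]
    linear_combination (-9 : Int) * h
  | succ d ih =>
    intro hd
    have ih' := ih (by omega)
    have hab : (10 : Int) ^ (d + 1) * 10 ^ (N - 2 * (d + 1)) = 10 ^ (N - (d + 1)) := by
      rw [← pow_add]
      congr 1
      omega
    have hb10 : (10 : Int) ^ (N - d) = 10 * 10 ^ (N - (d + 1)) := by
      rw [show N - d = (N - (d + 1)) + 1 by omega, pow_succ]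
      ring
    have hc : 9 * repOnesNat (N - 2 * (d + 1)) = (10 : Int) ^ (N - 2 * (d + 1)) - 1 :=
      nine_rep _
    rw [show S N (d + 1) = S N d + repOnesNat (N - 2 * (d + 1)) * 10 ^ (d + 1) from rfl]
    rw [hb10] at ih'
    rw [show (d + 1) + 1 = d + 2 from rfl, pow_succ]
    linear_combination ih' - 9 * (10 : Int) ^ (d + 1) * hc - 9 * hab

theorem alt_eq (N : Nat) (hN : 1 ≤ N) :
    make_dartboard_alt (N : Int)
      = (List.range N).map (fun i => S N (min i (N - 1 - i))) := by
  unfold make_dartboard_alt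
  rw [if_neg (by omega : ¬((N : Int) = 0))]
  rw [PySem.List.pyRange_zero_nat]
  rw [PySem.List.foldl_append_singleton_eq_map]
  rw [List.nil_append, List.map_map]
  refine List.map_congr_left fun i hi => ?_
  rw [List.mem_range] at hi
  show PySem.Int.floordiv
      ((10 ^ (min (i : Int) ((N : Int) - 1 - i) + 1).toNat - 1)
        * (10 ^ ((N : Int) - min (i : Int) ((N : Int) - 1 - i)).toNat - 1)) 81
    = S N (min i (N - 1 - i))
  have h1 : (min (i : Int) ((N : Int) - 1 - i) + 1).toNat = min i (N - 1 - i) + 1 := by omega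
  have h2 : ((N : Int) - min (i : Int) ((N : Int) - 1 - i)).toNat = N - min i (N - 1 - i) := by
    omega
  rw [h1, h2, closed_form N (min i (N - 1 - i)) (by omega)]
  rw [PySem.Int.floordiv_eq_ediv_of_pos (by norm_num)]
  exact Int.mul_ediv_cancel_left _ (by norm_num)

theorem getD_map_range (f : Nat → Int) (m j : Nat) (h : j < m) :
    ((List.range m).map f).getD j 0 = f j := by
  simp [List.getD, h]

theorem set_append_cons (P rest : List Int) (m : Nat) (v x : Int) (h : m = P.length) :
    (P ++ x :: rest).set m v = (P ++ [v]) ++ rest := by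
  subst h
  rw [List.set_append_right _ _ le_rfl, Nat.sub_self, List.set_cons_zero, List.append_assoc,
    List.singleton_append]

-- invariant of A's first loop: after processing indices 1..j the list holds S N 0..S N j
theorem loop1 (N : Nat) (hN : 1 ≤ N) : ∀ (j : Nat), j ≤ (N - 1) / 2 →
    (PySem.List.pyRange 1 ((j + 1 : Nat) : Int) 1).foldl
      (fun r i => PySem.List.pySetD r i
        (PySem.List.pyGetD r (i - 1) 0 + onesZeros ((N : Int) - 2 * i) i))
      ((List.range 1).map (S N) ++ List.replicate (N - 1) 1)
    = (List.range (j + 1)).map (S N) ++ List.replicate (N - (j + 1)) 1 := by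
  intro j
  induction j with
  | zero =>
    intro _
    rw [show (((0:Nat) + 1 : Nat) : Int) = 1 by norm_cast, PySem.List.pyRange_one_eq_nil le_rfl]
    simp
  | succ j ih =>
    intro hj
    rw [show (((j + 1) + 1 : Nat) : Int) = ((j + 1 : Nat) : Int) + 1 by push_cast; ring]
    rw [PySem.List.pyRange_one_succ_right (by exact_mod_cast Nat.one_le_iff_ne_zero.mpr (by omega)),
      List.foldl_append, ih (by omega)]
    simp only [List.foldl_cons, List.foldl_nil]
    rw [show ((j + 1 : Nat) : Int) - 1 = ((j : Nat) : Int) by push_cast; ring,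
      PySem.List.pyGetD_natCast, PySem.List.pySetD_natCast]
    have hget : ((List.range (j + 1)).map (S N) ++ List.replicate (N - (j + 1)) 1).getD j 0
        = S N j := by
      rw [List.getD_append _ _ _ _ (by simp)]
      exact getD_map_range _ _ _ (by omega)
    rw [hget]
    have hoz : onesZeros ((N : Int) - 2 * ((j + 1 : Nat) : Int)) ((j + 1 : Nat) : Int)
        = repOnesNat (N - 2 * (j + 1)) * 10 ^ (j + 1) := by
      unfold onesZeros repOnes
      have h1 : ((N : Int) - 2 * ((j + 1 : Nat) : Int)).toNat = N - 2 * (j + 1) := by omega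
      have h2 : (((j + 1 : Nat) : Int)).toNat = j + 1 := by omega
      rw [h1, h2]
    rw [hoz]
    have hrep : List.replicate (N - (j + 1)) (1 : Int)
        = 1 :: List.replicate (N - (j + 1 + 1)) 1 := by
      rw [show N - (j + 1) = (N - (j + 1 + 1)) + 1 by omega, List.replicate_succ]
    rw [hrep, set_append_cons _ _ _ _ _ (by simp)]
    rw [show ((List.range (j + 1)).map (S N) ++ [S N j + repOnesNat (N - 2 * (j + 1)) * 10 ^ (j + 1)])
        = (List.range (j + 1 + 1)).map (S N) by simp [List.range_succ, S]]

-- invariant of A's mirror loop: index M+t receives S N (N-1-(M+t))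
theorem loop2 (N M : Nat) (hN : 1 ≤ N) (hM : M = (N + 1) / 2) : ∀ (k : Nat), k ≤ N - M →
    (PySem.List.pyRange ((M : Nat) : Int) ((M + k : Nat) : Int) 1).foldl
      (fun r i => PySem.List.pySetD r i (PySem.List.pyGetD r ((N : Int) - 1 - i) 0))
      ((List.range M).map (S N) ++ List.replicate (N - M) 1)
    = (List.range M).map (S N) ++ (List.range k).map (fun t => S N (N - 1 - (M + t)))
        ++ List.replicate (N - M - k) 1 := by
  intro k
  induction k with
  | zero =>
    intro _
    rw [show ((M + 0 : Nat) : Int) = ((M : Nat) : Int) by norm_cast,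
      PySem.List.pyRange_one_eq_nil le_rfl]
    simp
  | succ k ih =>
    intro hk
    rw [show ((M + (k + 1) : Nat) : Int) = ((M + k : Nat) : Int) + 1 by push_cast; ring]
    rw [PySem.List.pyRange_one_succ_right (by exact_mod_cast Nat.le_add_right M k),
      List.foldl_append, ih (by omega)]
    simp only [List.foldl_cons, List.foldl_nil]
    rw [show (N : Int) - 1 - ((M + k : Nat) : Int) = ((N - 1 - (M + k) : Nat) : Int) by
      push_cast; omega]
    rw [PySem.List.pyGetD_natCast, PySem.List.pySetD_natCast]
    have hget : ((List.range M).map (S N) ++ (List.range k).map (fun t => S N (N - 1 - (M + t)))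
          ++ List.replicate (N - M - k) 1).getD (N - 1 - (M + k)) 0
        = S N (N - 1 - (M + k)) := by
      rw [List.append_assoc, List.getD_append _ _ _ _ (by simp; omega)]
      exact getD_map_range _ _ _ (by omega)
    rw [hget]
    have hrep : List.replicate (N - M - k) (1 : Int)
        = 1 :: List.replicate (N - M - (k + 1)) 1 := by
      rw [show N - M - k = (N - M - (k + 1)) + 1 by omega, List.replicate_succ]
    have hlenAB : ((List.range M).map (S N)
        ++ (List.range k).map (fun t => S N (N - 1 - (M + t)))).length = M + k := by simp
    rw [hrep, set_append_cons _ _ _ _ _ hlenAB.symm]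
    rw [List.append_assoc ((List.range M).map (S N))]
    congr 1
    rw [List.range_succ, List.map_append, List.map_singleton]

theorem init_state (N : Nat) (hN : 1 ≤ N) :
    PySem.List.pySetD (List.replicate N (1 : Int)) 0 (repOnes (N : Int))
      = (List.range 1).map (S N) ++ List.replicate (N - 1) 1 := by
  obtain ⟨m, rfl⟩ : ∃ m, N = m + 1 := ⟨N - 1, by omega⟩
  rw [List.replicate_succ, PySem.List.pySetD_of_nonneg]
  · simp [List.range_one, repOnes, S]
  · norm_num

theorem final_assembly (N M : Nat) (hN : 1 ≤ N) (hM : M = (N - 1) / 2 + 1) :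
    (List.range M).map (S N) ++ (List.range (N - M)).map (fun t => S N (N - 1 - (M + t)))
      = (List.range N).map (fun i => S N (min i (N - 1 - i))) := by
  have h : List.range N = List.range M ++ List.map (fun x => M + x) (List.range (N - M)) := by
    conv_lhs => rw [show N = M + (N - M) by omega]
    rw [List.range_add]
  rw [h, List.map_append, List.map_map]
  congr 1
  · refine List.map_congr_left fun i hi => ?_
    rw [List.mem_range] at hi
    congr 1
    omega
  · refine List.map_congr_left fun t ht => ?_
    rw [List.mem_range] at ht
    simp only [Function.comp]
    congr 1
    omega

theorem both_loops (N : Nat) (hN : 1 ≤ N) :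
    (PySem.List.pyRange (((N - 1) / 2 + 1 : Nat) : Int) ((N : Nat) : Int) 1).foldl
      (fun r i => PySem.List.pySetD r i (PySem.List.pyGetD r ((N : Int) - 1 - i) 0))
      ((PySem.List.pyRange 1 (((N - 1) / 2 + 1 : Nat) : Int) 1).foldl
        (fun r i => PySem.List.pySetD r i
          (PySem.List.pyGetD r (i - 1) 0 + onesZeros ((N : Int) - 2 * i) i))
        ((List.range 1).map (S N) ++ List.replicate (N - 1) 1))
    = (List.range N).map (fun i => S N (min i (N - 1 - i))) := by
  rw [loop1 N hN ((N - 1) / 2) le_rfl]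
  have l2 := loop2 N ((N - 1) / 2 + 1) hN (by omega) (N - ((N - 1) / 2 + 1)) le_rfl
  rw [show (N - 1) / 2 + 1 + (N - ((N - 1) / 2 + 1)) = N by omega, Nat.sub_self] at l2
  rw [l2, List.replicate_zero, List.append_nil]
  exact final_assembly N ((N - 1) / 2 + 1) hN rfl

theorem a_eq (N : Nat) (hN : 1 ≤ N) :
    make_dartboard (N : Int) = (List.range N).map (fun i => S N (min i (N - 1 - i))) := by
  have hmod : PySem.Int.mod (N : Int) 2 = ((N % 2 : Nat) : Int) := by
    exact_mod_cast PySem.Int.mod_natCast N 2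
  have hdiv : PySem.Int.floordiv (N : Int) 2 = ((N / 2 : Nat) : Int) := by
    exact_mod_cast PySem.Int.floordiv_natCast N 2
  unfold make_dartboard
  rw [if_neg (by omega : ¬((N : Int) = 0))]
  simp only [hmod, hdiv, Int.toNat_natCast]
  split_ifs with hc
  · rw [show ((N / 2 : Nat) : Int) = (((N - 1) / 2 + 1 : Nat) : Int) from
      Nat.cast_inj.mpr (by
        have hc' : N % 2 = 0 := by exact_mod_cast hc
        omega),
      init_state N hN]
    exact both_loops N hN
  · have hc' : N % 2 = 1 := by
      rcases Nat.mod_two_eq_zero_or_one N with h | h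
      · exact absurd (by exact_mod_cast h) hc
      · exact h
    rw [show ((N / 2 : Nat) : Int) + 1 = (((N - 1) / 2 + 1 : Nat) : Int) by push_cast; omega,
      init_state N hN]
    exact both_loops N hN

-- ===== VERDICT (by name: the statement is the Claim_ definition above) =====
theorem make_dartboard_spec : Claim_equal_make_dartboard := by
  intro n _ hpre
  obtain ⟨N, rfl⟩ := Int.eq_ofNat_of_zero_le hpre
  unfold Spec_make_dartboard
  rcases Nat.eq_zero_or_pos N with h0 | h1
  · subst h0; rfl
  · rw [a_eq N h1, alt_eq N h1]
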